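-- pv_equiv track=rewrite | github.com/hey-watchme/app-android-zero-touch | backend/services/wiki_ingestor.py | _normalize_machine_key
-- ===== SOURCE A (Python) =====
-- from typing import Any, Dict, List, Optional
--
-- def _normalize_text(value: Any) -> Optional[str]:
--     if value is None:
--         return None
--     text = str(value).strip()
--     return text or None
--
-- def _normalize_machine_key(value: Any) -> Optional[str]:
--     text = _normalize_text(value)
--     if not text:
--         return None
--
--     chars: List[str] = []
--     previous_sep = False
--     for raw_char in text.casefold():
--         if raw_char.isalnum():
--             chars.append(raw_char)
--             previous_sep = False
--             continue
--         if raw_char in {" ", "-", "_", "/", "&", ":"}: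
--             if not previous_sep:
--                 chars.append("-")
--                 previous_sep = True
--
--     key = "".join(chars).strip("-")
--     return key or None
-- ===== SOURCE B (Python) =====
-- from typing import Any, Optional
--
-- def _normalize_machine_key(value: Any) -> Optional[str]:
--     if value is None:
--         return None
--     text = str(value).strip().casefold()
--     # map pass: keep alphanumerics, turn separators into '-', drop the rest
--     mapped = "".join(c if c.isalnum() else "-" for c in text if c.isalnum() or c in " -_/&:")
--     # collapse '-' runs and strip the ends: join the non-empty pieces
--     key = "-".join(p for p in mapped.split("-") if p)
--     return key or None
-- ===== Notes on version B (the rewrite author's own statement) =====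
-- stated objective: idiomatic
-- what changed: Replaced the stateful single-pass loop with a previous_sep flag by the standard slugify decomposition: a stateless map pass (alnum kept, separators to '-', rest dropped) followed by split('-')/filter/join to collapse runs and trim the ends.
import Mathlib
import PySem

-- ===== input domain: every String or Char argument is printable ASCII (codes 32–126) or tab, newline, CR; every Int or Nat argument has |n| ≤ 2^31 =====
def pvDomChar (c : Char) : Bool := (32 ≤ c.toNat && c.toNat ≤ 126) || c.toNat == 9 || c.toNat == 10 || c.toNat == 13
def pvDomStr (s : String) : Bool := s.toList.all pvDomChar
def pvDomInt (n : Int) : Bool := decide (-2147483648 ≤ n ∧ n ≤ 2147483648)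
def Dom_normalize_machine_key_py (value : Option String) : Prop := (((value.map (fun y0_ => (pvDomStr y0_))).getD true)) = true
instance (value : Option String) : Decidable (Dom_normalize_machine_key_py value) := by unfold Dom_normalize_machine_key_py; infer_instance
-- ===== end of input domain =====

-- B replaces A's stateful previous_sep loop by the idiomatic map-then-split/filter/join slugify decomposition; same return value.
-- (On the ASCII domain str.casefold() coincides with lowercasing, ported as PySem.Chars.lower in both ports.)

-- the separator set {" ", "-", "_", "/", "&", ":"} shared by both Pythons
def pvSeps : List Char := [' ', '-', '_', '/', '&', ':']

-- ===== PORT A =====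
-- _normalize_text: str(value).strip(), empty -> None (value is None or a str here)
def normalize_text_py (value : Option String) : Option String :=
  match value with
  | none => none
  | some v =>
    let t := PySem.Chars.strip v.toList
    if t = [] then none else some (String.ofList t)

-- the body of A's for-loop: state = (chars, previous_sep)
def pvStepA (acc : List Char × Bool) (c : Char) : List Char × Bool :=
  if PySem.Chars.isalnum c then (acc.1 ++ [c], false)
  else if c ∈ pvSeps then
    (if acc.2 then acc else (acc.1 ++ ['-'], true))
  else acc

def normalize_machine_key_py (value : Option String) : Option String :=
  match normalize_text_py value with
  | none => none
  | some t =>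
    let st := (PySem.Chars.lower t.toList).foldl pvStepA ([], false)
    let key := PySem.Chars.stripChars st.1 ['-']
    if key = [] then none else some (String.ofList key)

-- ===== PORT B =====
-- the per-character mapper of B's first pass
def pvMapB (c : Char) : Option Char :=
  if PySem.Chars.isalnum c then some c
  else if c ∈ pvSeps then some '-'
  else none

def normalize_machine_key_py_alt (value : Option String) : Option String :=
  match value with
  | none => none
  | some v =>
    let text := PySem.Chars.lower (PySem.Chars.strip v.toList)
    let mapped := text.filterMap pvMapB
    -- "-".join(p for p in mapped.split("-") if p)
    let key := PySem.Chars.join ['-'] ((mapped.splitOn '-').filter (· ≠ []))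
    if key = [] then none else some (String.ofList key)

-- ===== PRECONDITION & SPEC =====
def Spec_normalize_machine_key_py (value : Option String) (out : Option String) : Prop := out = normalize_machine_key_py_alt value
instance (value : Option String) (out : Option String) : Decidable (Spec_normalize_machine_key_py value out) := by unfold Spec_normalize_machine_key_py; infer_instance

-- ===== CLAIM (what is proved, stated in full; the proofs are below) =====
def Claim_equal_normalize_machine_key_py : Prop := ∀ (value : Option String), Dom_normalize_machine_key_py value → Spec_normalize_machine_key_py value (normalize_machine_key_py value)

-- ===== LEMMAS AND PROOFS =====

-- the characters A's loop appends, as a function of the mapped list and the previous_sep flag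
def pvOut : List Char → Bool → List Char
  | [], _ => []
  | c :: m, p =>
    if PySem.Chars.isalnum c then c :: pvOut m false
    else if c ∈ pvSeps then (if p then pvOut m p else '-' :: pvOut m true)
    else pvOut m p

-- reference: the collapsed key before end-stripping; flag = "currently inside an alnum run"
def pvCanon : Bool → List Char → List Char
  | _, [] => []
  | inRun, c :: m =>
    if c = '-' then
      (if inRun then (let r := pvCanon false m; if r = [] then [] else '-' :: r)
       else pvCanon false m)
    else c :: pvCanon true m

theorem pv_foldA_eq_out (cs : List Char) : ∀ (acc : List Char) (p : Bool),
    (cs.foldl pvStepA (acc, p)).1 = acc ++ pvOut (cs.filterMap pvMapB) p := by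
  induction cs with
  | nil => intro acc p; simp [pvOut]
  | cons c cs ih =>
    intro acc p
    by_cases h1 : PySem.Chars.isalnum c
    · simp [pvMapB, pvStepA, h1, pvOut, ih]
    · by_cases h2 : c ∈ pvSeps
      · have hd : ¬ PySem.Chars.isalnum '-' := by decide
        have hm : '-' ∈ pvSeps := by decide
        cases p with
        | false => simp [pvMapB, pvStepA, h1, h2, pvOut, hd, hm, ih]
        | true => simp [pvMapB, pvStepA, h1, h2, pvOut, hd, hm, ih]
      · simp [pvMapB, pvStepA, h1, h2, ih]

theorem pv_mem_mapped (cs : List Char) : ∀ c ∈ cs.filterMap pvMapB, PySem.Chars.isalnum c ∨ c = '-' := by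
  intro c hc
  rcases List.mem_filterMap.1 hc with ⟨x, _, hx⟩
  unfold pvMapB at hx
  split_ifs at hx with h1 h2
  · exact Or.inl (by cases hx; exact h1)
  · exact Or.inr (by cases hx; rfl)

theorem pv_out_canon (M : List Char) (h : ∀ c ∈ M, PySem.Chars.isalnum c ∨ c = '-') :
    (pvOut M true = pvCanon false M ∨ (pvCanon false M ≠ [] ∧ pvOut M true = pvCanon false M ++ ['-'])) ∧
    (pvOut M false = pvCanon true M ∨ pvOut M false = pvCanon true M ++ ['-']) := by
  induction M with
  | nil => exact ⟨Or.inl rfl, Or.inl rfl⟩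
  | cons c m ih =>
    have hm : ∀ x ∈ m, PySem.Chars.isalnum x ∨ x = '-' := fun x hx => h x (List.mem_cons_of_mem _ hx)
    obtain ⟨ih1, ih2⟩ := ih hm
    rcases h c (List.mem_cons_self ..) with hA | hD
    · have hc : c ≠ '-' := by intro e; subst e; revert hA; decide
      have e1 : pvOut (c :: m) true = c :: pvOut m false := by simp [pvOut, hA]
      have e2 : pvOut (c :: m) false = c :: pvOut m false := by simp [pvOut, hA]
      have e3 : pvCanon false (c :: m) = c :: pvCanon true m := by simp [pvCanon, hc]
      have e4 : pvCanon true (c :: m) = c :: pvCanon true m := by simp [pvCanon, hc]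
      rw [e1, e2, e3, e4]
      rcases ih2 with h2 | h2
      · exact ⟨Or.inl (by rw [h2]), Or.inl (by rw [h2])⟩
      · exact ⟨Or.inr ⟨by simp, by rw [h2]; rfl⟩, Or.inr (by rw [h2]; rfl)⟩
    · subst hD
      have hna : ¬ PySem.Chars.isalnum '-' := by decide
      have hms : '-' ∈ pvSeps := by decide
      have e1 : pvOut ('-' :: m) true = pvOut m true := by simp [pvOut, hna, hms]
      have e2 : pvOut ('-' :: m) false = '-' :: pvOut m true := by simp [pvOut, hna, hms]
      have e3 : pvCanon false ('-' :: m) = pvCanon false m := by simp [pvCanon]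
      have e4 : pvCanon true ('-' :: m) =
          (if pvCanon false m = [] then [] else '-' :: pvCanon false m) := by simp [pvCanon]
      rw [e1, e2, e3, e4]
      refine ⟨ih1, ?_⟩
      rcases ih1 with h1 | ⟨hne, h1⟩
      · by_cases hr : pvCanon false m = []
        · right; rw [h1, hr]; simp
        · left; rw [h1]; simp [hr]
      · right; rw [h1]; simp [hne]

-- pvCanon true differs from pvCanon false by at most one leading '-'
theorem pv_canon_true_false (M : List Char) :
    pvCanon true M = pvCanon false M ∨
    (pvCanon false M ≠ [] ∧ pvCanon true M = '-' :: pvCanon false M) := by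
  cases M with
  | nil => exact Or.inl rfl
  | cons c m =>
    by_cases hc : c = '-'
    · subst hc
      by_cases hr : pvCanon false m = []
      · left; simp [pvCanon, hr]
      · right; constructor
        · simpa [pvCanon] using hr
        · simp [pvCanon, hr]
    · left; simp [pvCanon, hc]

-- pvCanon false never starts nor ends with '-'
theorem pv_canon_ends (M : List Char) :
    (pvCanon false M).head? ≠ some '-' ∧
    (pvCanon false M).getLast? ≠ some '-' ∧ (pvCanon true M).getLast? ≠ some '-' := by
  induction M with
  | nil => simp [pvCanon]
  | cons c m ih =>
    obtain ⟨ih1, ih2, ih3⟩ := ih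
    by_cases hc : c = '-'
    · subst hc
      have e3 : pvCanon false ('-' :: m) = pvCanon false m := by simp [pvCanon]
      have e4 : pvCanon true ('-' :: m) =
          (if pvCanon false m = [] then [] else '-' :: pvCanon false m) := by simp [pvCanon]
      refine ⟨by rw [e3]; exact ih1, by rw [e3]; exact ih2, ?_⟩
      rw [e4]
      by_cases hr : pvCanon false m = []
      · simp [hr]
      · rcases List.exists_cons_of_ne_nil hr with ⟨y, ys, hy⟩
        rw [if_neg hr, hy, List.getLast?_cons_cons]
        exact hy ▸ ih2
    · have e5 : pvCanon false (c :: m) = c :: pvCanon true m := by simp [pvCanon, hc]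
      have e6 : pvCanon true (c :: m) = c :: pvCanon true m := by simp [pvCanon, hc]
      have hlast : (c :: pvCanon true m).getLast? ≠ some '-' := by
        cases hr : pvCanon true m with
        | nil => simpa [hr] using hc
        | cons y ys => simpa [List.getLast?_cons_cons] using (hr ▸ ih3)
      exact ⟨by rw [e5]; simpa using hc, by rw [e5]; exact hlast, by rw [e6]; exact hlast⟩

-- strip helpers: the predicate stripChars uses for chars = ['-']
def pvP (c : Char) : Bool := decide (c = '-')

theorem pv_stripChars_eq (x : List Char) :
    PySem.Chars.stripChars x ['-'] = ((x.dropWhile pvP).reverse.dropWhile pvP).reverse := by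
  have hp : (fun c => List.contains ['-'] c) = pvP := by
    funext c; by_cases h : c = '-' <;> simp [pvP, h]
  simp only [PySem.Chars.stripChars, hp]

theorem pv_dropWhile_of_head (x : List Char) (h : x.head? ≠ some '-') :
    x.dropWhile pvP = x := by
  cases x with
  | nil => rfl
  | cons y ys =>
    have hy : y ≠ '-' := by intro e; exact h (by simp [e])
    simp [pvP, hy]

theorem pv_strip_clean (x : List Char) (h1 : x.head? ≠ some '-') (h2 : x.getLast? ≠ some '-') :
    PySem.Chars.stripChars x ['-'] = x := by
  rw [pv_stripChars_eq, pv_dropWhile_of_head x h1,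
    pv_dropWhile_of_head x.reverse (by simpa using h2), List.reverse_reverse]

theorem pv_strip_cons_dash (x : List Char) :
    PySem.Chars.stripChars ('-' :: x) ['-'] = PySem.Chars.stripChars x ['-'] := by
  rw [pv_stripChars_eq, pv_stripChars_eq]
  simp [pvP]

theorem pv_strip_append_dash (x : List Char) :
    PySem.Chars.stripChars (x ++ ['-']) ['-'] = PySem.Chars.stripChars x ['-'] := by
  rw [pv_stripChars_eq, pv_stripChars_eq, List.dropWhile_append]
  by_cases hx : x.dropWhile pvP = []
  · simp [hx, pvP]
  · rcases List.exists_cons_of_ne_nil hx with ⟨y, ys, hy⟩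
    simp [hy, pvP]

-- A's key equals pvCanon false of the mapped list
theorem pv_A_key (M : List Char) (h : ∀ c ∈ M, PySem.Chars.isalnum c ∨ c = '-') :
    PySem.Chars.stripChars (pvOut M false) ['-'] = pvCanon false M := by
  obtain ⟨hh, hl, -⟩ := pv_canon_ends M
  have hclean : PySem.Chars.stripChars (pvCanon false M) ['-'] = pvCanon false M :=
    pv_strip_clean _ hh hl
  obtain ⟨-, h2⟩ := pv_out_canon M h
  rcases pv_canon_true_false M with ht | ⟨-, ht⟩ <;> rcases h2 with h2 | h2
  · rw [h2, ht]; exact hclean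
  · rw [h2, ht, pv_strip_append_dash]; exact hclean
  · rw [h2, ht, pv_strip_cons_dash]; exact hclean
  · rw [h2, ht, List.cons_append, pv_strip_cons_dash, pv_strip_append_dash]; exact hclean

-- a '-'-join of non-empty pieces is empty iff there are no pieces
theorem pv_intercalate_ne (l : List (List Char)) (h : ∀ x ∈ l, x ≠ []) :
    ['-'].intercalate l = [] ↔ l = [] := by
  cases l with
  | nil => simp [List.intercalate]
  | cons x xs =>
    have hx : x ≠ [] := h x (List.mem_cons_self ..)
    cases xs with
    | nil => simp [List.intercalate, hx]
    | cons y ys => simp [List.intercalate, List.intersperse, hx]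

-- B's split/filter/join equals pvCanon
theorem pv_split_canon (M : List Char) :
    ['-'].intercalate ((M.splitOn '-').filter (· ≠ [])) = pvCanon false M ∧
    (∀ h t, M.splitOn '-' = h :: t →
      h ++ (if t.filter (· ≠ []) = ([] : List (List Char)) then []
            else '-' :: ['-'].intercalate (t.filter (· ≠ []))) = pvCanon true M) := by
  induction M with
  | nil =>
    constructor
    · simp [List.splitOn, List.splitOnP_nil, List.intercalate, pvCanon]
    · intro h t he
      simp only [List.splitOn, List.splitOnP_nil, List.cons.injEq] at he
      obtain ⟨rfl, rfl⟩ := he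
      simp [pvCanon]
  | cons c m ih =>
    obtain ⟨ih1, ih2⟩ := ih
    have hfil : ∀ x ∈ (m.splitOn '-').filter (· ≠ []), x ≠ [] := by
      intro x hx; simpa using (List.mem_filter.1 hx).2
    by_cases hc : c = '-'
    · subst hc
      have hsp : ('-' :: m).splitOn '-' = [] :: m.splitOn '-' := by
        simp [List.splitOn, List.splitOnP_cons]
      constructor
      · rw [hsp]
        simpa [pvCanon] using ih1
      · intro h t he
        rw [hsp] at he
        obtain ⟨rfl, rfl⟩ := List.cons.injEq .. ▸ he
        have e4 : pvCanon true ('-' :: m) =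
            (if pvCanon false m = [] then [] else '-' :: pvCanon false m) := by simp [pvCanon]
        rw [e4]
        by_cases hf : (m.splitOn '-').filter (· ≠ []) = []
        · have h0 : pvCanon false m = [] := by rw [← ih1, hf]; simp [List.intercalate]
          rw [List.nil_append, if_pos hf, if_pos h0]
        · have hne : pvCanon false m ≠ [] := by
            rw [← ih1]; exact fun e => hf ((pv_intercalate_ne _ hfil).1 e)
          rw [List.nil_append, if_neg hf, if_neg hne, ih1]
    · have hbe : (c == '-') = false := by simpa using hc
      rcases List.exists_cons_of_ne_nil (List.splitOnP_ne_nil (· == '-') m) with ⟨h', t', hsp'⟩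
      have hsp : (c :: m).splitOn '-' = (c :: h') :: t' := by
        unfold List.splitOn
        rw [List.splitOnP_cons, hbe]
        simp [hsp']
      have key : c :: (h' ++ (if t'.filter (· ≠ []) = ([] : List (List Char)) then []
            else '-' :: ['-'].intercalate (t'.filter (· ≠ [])))) = c :: pvCanon true m := by
        rw [ih2 h' t' (by simpa [List.splitOn] using hsp')]
      constructor
      · rw [hsp]
        have e5 : pvCanon false (c :: m) = c :: pvCanon true m := by simp [pvCanon, hc]
        have hfc : ((c :: h') :: t').filter (· ≠ []) = (c :: h') :: t'.filter (· ≠ []) := by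
          simp
        rw [hfc, e5, ← key]
        by_cases hf : t'.filter (· ≠ []) = []
        · rw [hf, if_pos rfl]
          simp [List.intercalate]
        · rcases List.exists_cons_of_ne_nil hf with ⟨q, qs, hq⟩
          rw [hq, if_neg (by simp)]
          simp [List.intercalate, List.intersperse_cons₂]
      · intro h t he
        rw [hsp] at he
        obtain ⟨rfl, rfl⟩ := List.cons.injEq .. ▸ he
        have e6 : pvCanon true (c :: m) = c :: pvCanon true m := by simp [pvCanon, hc]
        rw [e6, ← key]; rfl

-- ===== VERDICT (by name: the statement is the Claim_ definition above) =====
theorem normalize_machine_key_py_spec : Claim_equal_normalize_machine_key_py := by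
  intro value _
  unfold Spec_normalize_machine_key_py
  cases value with
  | none => rfl
  | some v =>
    by_cases hT : PySem.Chars.strip v.toList = []
    · simp [normalize_machine_key_py, normalize_machine_key_py_alt, normalize_text_py, hT,
        PySem.Chars.lower, List.splitOn, List.splitOnP_nil, PySem.Chars.join, List.intercalate]
    · have h1 : normalize_text_py (some v) = some (String.ofList (PySem.Chars.strip v.toList)) := by
        simp [normalize_text_py, hT]
      have htl : (String.ofList (PySem.Chars.strip v.toList)).toList = PySem.Chars.strip v.toList := by
        simp
      have hfold := pv_foldA_eq_out (PySem.Chars.lower (PySem.Chars.strip v.toList)) [] false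
      have hA := pv_A_key ((PySem.Chars.lower (PySem.Chars.strip v.toList)).filterMap pvMapB)
        (pv_mem_mapped (PySem.Chars.lower (PySem.Chars.strip v.toList)))
      have hB := (pv_split_canon ((PySem.Chars.lower (PySem.Chars.strip v.toList)).filterMap pvMapB)).1
      simp only [normalize_machine_key_py, normalize_machine_key_py_alt, h1, htl, hfold,
        List.nil_append, hA, PySem.Chars.join, hB]
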